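-- pv_equiv track=rewrite | github.com/andyhsu91/cs373-collatz | SphereCollatz.py | collatz_cache_init
-- ===== SOURCE A (Python) =====
-- def collatz_cache_init (cachelen) :
--
-- 	cache = [0] * cachelen	# Cache of size inclusive range
--
-- 	twos = 1
-- 	twoscnt = 1
-- 	while twos < cachelen :	# Introduce powers of two into cache
-- 		cache[twos] = twoscnt
-- 		twos *= 2
-- 		twoscnt += 1
-- 	return cache
-- ===== SOURCE B (Python) =====
-- def collatz_cache_init(cachelen):
--     # each index decides locally: powers of two get their bit_length, the rest zero
--     return [i.bit_length() if i & (i - 1) == 0 else 0 for i in range(cachelen)]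
-- ===== Notes on version B (the rewrite author's own statement) =====
-- stated objective: alternative
-- what changed: Replaces A's preallocated zero list plus a doubling loop that writes only the power-of-two slots with a single comprehension over all indices that decides each cell locally: emit the index's bit_length when the index is a power of two by the bit test i & (i-1), else zero.
import Mathlib
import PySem

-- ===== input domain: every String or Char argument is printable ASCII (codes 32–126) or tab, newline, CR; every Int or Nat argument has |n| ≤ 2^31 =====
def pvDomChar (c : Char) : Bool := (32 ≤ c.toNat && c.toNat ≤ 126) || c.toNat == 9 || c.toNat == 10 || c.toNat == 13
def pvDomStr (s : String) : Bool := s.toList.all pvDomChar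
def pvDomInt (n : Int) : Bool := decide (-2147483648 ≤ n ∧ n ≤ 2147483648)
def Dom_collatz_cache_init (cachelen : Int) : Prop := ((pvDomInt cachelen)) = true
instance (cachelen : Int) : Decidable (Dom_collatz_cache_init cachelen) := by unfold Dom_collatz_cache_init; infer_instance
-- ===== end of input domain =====

-- B replaces A's doubling loop (writes only power-of-two slots of a preallocated zero list)
-- with a single comprehension deciding each index locally via the i & (i-1) test and i.bit_length();
-- same O(n) cost, genuinely different decomposition (objective: alternative).

-- ===== PORT A =====
-- while twos < cachelen: cache[twos] = twoscnt; twos *= 2; twoscnt += 1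
-- (the '0 < twos' conjunct is a totality guard only; the loop is always entered with twos = 1 > 0)
def collatzLoop (cachelen twos twoscnt : Int) (cache : List Int) : List Int :=
  if h : 0 < twos ∧ twos < cachelen then
    collatzLoop cachelen (twos * 2) (twoscnt + 1) (cache.set twos.toNat twoscnt)
  else cache
termination_by (cachelen - twos).toNat
decreasing_by omega

def collatz_cache_init (cachelen : Int) : List Int :=
  collatzLoop cachelen 1 1 (List.replicate cachelen.toNat 0)

-- ===== PORT B =====
def collatz_cache_init_alt (cachelen : Int) : List Int :=
  (PySem.List.pyRange 0 cachelen 1).map (fun i =>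
    if PySem.Int.band i (i - 1) = 0 then (PySem.Int.bitLength i : Int) else 0)

-- ===== PRECONDITION & SPEC =====
def Spec_collatz_cache_init (cachelen : Int) (out : List Int) : Prop := out = collatz_cache_init_alt cachelen
instance (cachelen : Int) (out : List Int) : Decidable (Spec_collatz_cache_init cachelen out) := by unfold Spec_collatz_cache_init; infer_instance

-- ===== CLAIM (what is proved, stated in full; the proofs are below) =====
def Claim_equal_collatz_cache_init : Prop := ∀ (cachelen : Int), Dom_collatz_cache_init cachelen → Spec_collatz_cache_init cachelen (collatz_cache_init cachelen)

-- ===== LEMMAS AND PROOFS =====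

-- 2^k is a power of two under the bit test
theorem pow2_and_pred (k : Nat) : 2 ^ k &&& (2 ^ k - 1) = 0 := by
  simp [Nat.and_two_pow_sub_one_eq_mod (2 ^ k) k]

-- a number strictly between consecutive powers of two fails the bit test
theorem and_pred_ne_zero (k r : Nat) (h1 : 0 < r) (h2 : r < 2 ^ k) :
    (2 ^ k + r) &&& (2 ^ k + r - 1) ≠ 0 := by
  intro h
  have e : 2 ^ k + r - 1 = 2 ^ k + (r - 1) := by omega
  have hb : ((2 ^ k + r) &&& (2 ^ k + r - 1)).testBit k = true := by
    rw [Nat.testBit_and, e, Nat.testBit_two_pow_add_eq, Nat.testBit_two_pow_add_eq,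
        Nat.testBit_eq_false_of_lt h2, Nat.testBit_eq_false_of_lt (by omega)]
    rfl
  rw [h] at hb
  simp at hb

theorem bitLength_two_pow (k : Nat) : PySem.Int.bitLength ((2 ^ k : Nat) : Int) = k + 1 := by
  induction k with
  | zero =>
    rw [PySem.Int.bitLength_natCast (by norm_num)]
    norm_num [PySem.Int.bitLength_zero]
  | succ k ih =>
    rw [PySem.Int.bitLength_natCast (Nat.pow_pos (by norm_num))]
    have h2 : 2 ^ (k + 1) / 2 = 2 ^ k := by
      rw [Nat.pow_succ, Nat.mul_div_cancel _ (by norm_num)]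
    rw [h2, ih]

-- invariant of A's doubling loop, per index
theorem collatzLoop_getElem? (cachelen : Int) (k : Nat) (cache : List Int)
    (hlen : cachelen ≤ (cache.length : Int)) (j : Nat) :
    (collatzLoop cachelen ((2 ^ k : Nat) : Int) ((k : Int) + 1) cache)[j]? =
      if j ≠ 0 ∧ j &&& (j - 1) = 0 ∧ 2 ^ k ≤ j ∧ (j : Int) < cachelen
      then some ((PySem.Int.bitLength (j : Int) : Nat) : Int)
      else cache[j]? := by
  rw [collatzLoop]
  by_cases hlt : ((2 ^ k : Nat) : Int) < cachelen
  · rw [dif_pos ⟨by positivity, hlt⟩]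
    have hcast1 : ((2 ^ k : Nat) : Int) * 2 = ((2 ^ (k + 1) : Nat) : Int) := by
      push_cast [Nat.pow_succ]; ring
    have hcast2 : ((k : Int) + 1) + 1 = ((k + 1 : Nat) : Int) + 1 := by push_cast; ring
    have hklen : 2 ^ k < cache.length := by
      have : ((2 ^ k : Nat) : Int) < (cache.length : Int) := lt_of_lt_of_le hlt hlen
      exact_mod_cast this
    rw [hcast1, hcast2, Int.toNat_natCast]
    rw [collatzLoop_getElem? cachelen (k + 1) (cache.set (2 ^ k) ((k : Int) + 1))
        (by simp only [List.length_set]; exact hlen) j]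
    by_cases hj : j = 2 ^ k
    · subst hj
      rw [if_neg (by
        rintro ⟨-, -, hle, -⟩
        exact absurd hle (by have := Nat.pow_lt_pow_succ (a := 2) (n := k) (by norm_num); omega))]
      rw [if_pos ⟨(Nat.pow_pos (n:=k) (by norm_num : (0:Nat) < 2)).ne', pow2_and_pred k, le_refl _, hlt⟩]
      rw [List.getElem?_set_self hklen, bitLength_two_pow]
      push_cast
      ring_nf
    · split_ifs with h1 h2 h2
      · rfl
      · exact absurd ⟨h1.1, h1.2.1,
          le_trans (Nat.pow_le_pow_right (by norm_num) (Nat.le_succ k)) h1.2.2.1, h1.2.2.2⟩ h2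
      · exfalso
        apply h1
        refine ⟨h2.1, h2.2.1, ?_, h2.2.2.2⟩
        by_contra hlt2
        have hgt : 2 ^ k < j := lt_of_le_of_ne h2.2.2.1 (Ne.symm hj)
        have := and_pred_ne_zero k (j - 2 ^ k) (by omega)
          (by have := Nat.pow_lt_pow_succ (a := 2) (n := k) (by norm_num); omega)
        rw [show 2 ^ k + (j - 2 ^ k) = j from by omega] at this
        exact this h2.2.1
      · exact List.getElem?_set_ne (fun he => hj he.symm)
  · rw [dif_neg (fun hcon => hlt hcon.2)]
    rw [if_neg (by
      rintro ⟨-, -, hle, hjlt⟩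
      have : ((2 ^ k : Nat) : Int) ≤ (j : Int) := by exact_mod_cast hle
      omega)]
termination_by (cachelen - ((2 ^ k : Nat) : Int)).toNat
decreasing_by
  have h1 : ((2 ^ k : Nat) : Int) < ((2 ^ (k + 1) : Nat) : Int) := by
    exact_mod_cast Nat.pow_lt_pow_succ (by norm_num)
  omega

-- ===== VERDICT (by name: the statement is the Claim_ definition above) =====
theorem collatz_cache_init_spec : Claim_equal_collatz_cache_init := by
  intro cachelen _
  unfold Spec_collatz_cache_init collatz_cache_init collatz_cache_init_alt
  apply List.ext_getElem?
  intro j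
  have h0 := collatzLoop_getElem? cachelen 0 (List.replicate cachelen.toNat 0) (by simp) j
  simp only [pow_zero, Nat.cast_one, Nat.cast_zero, zero_add] at h0
  rw [h0]
  by_cases hjlt : j < cachelen.toNat
  · have hc : cachelen = ((cachelen.toNat : Nat) : Int) := (Int.toNat_of_nonneg (by omega)).symm
    have hR : ((PySem.List.pyRange 0 cachelen 1).map (fun i =>
        if PySem.Int.band i (i - 1) = 0 then (PySem.Int.bitLength i : Int) else 0))[j]? =
        some (if PySem.Int.band (j : Int) ((j : Int) - 1) = 0
              then (PySem.Int.bitLength (j : Int) : Int) else 0) := by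
      rw [hc]
      exact PySem.List.getElem?_map_pyRange_zero _ cachelen.toNat j hjlt
    rw [hR]
    by_cases hj0 : j = 0
    · subst hj0
      simp [PySem.Int.band_neg_one, PySem.Int.bitLength_zero, hjlt]
    · have hband : PySem.Int.band (j : Int) ((j : Int) - 1) = ((j &&& (j - 1) : Nat) : Int) := by
        rw [show ((j : Int) - 1) = ((j - 1 : Nat) : Int) from by omega, PySem.Int.band_natCast]
      have hjlt' : (j : Int) < cachelen := by omega
      rw [hband]
      by_cases hand : j &&& (j - 1) = 0
      · rw [if_pos ⟨hj0, hand, by omega, hjlt'⟩, if_pos (by exact_mod_cast hand)]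
      · rw [if_neg (fun h => hand h.2.1), if_neg (by exact_mod_cast hand),
            List.getElem?_replicate, if_pos hjlt]
  · rw [if_neg (by rintro ⟨-, -, -, hjc⟩; omega)]
    rw [List.getElem?_replicate, if_neg hjlt]
    symm
    apply List.getElem?_eq_none
    simp only [List.length_map, PySem.List.length_pyRange_one]
    omega
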